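-- pv_equiv track=rewrite | github.com/Igor1212313/Name-lr2-programming-languages | task1/main.py | nearest_prime_distance
-- ===== SOURCE A (Python) =====
-- def is_prime(n):
--     if n < 2:
--         return False
--     if n == 2:
--         return True
--     if n % 2 == 0:
--         return False
--     i = 3
--     while i * i <= n:
--         if n % i == 0:
--             return False
--         i += 2
--     return True
--
-- def nearest_prime_distance(n):
--     if is_prime(n):
--         return 0
--     d = 1
--     while True:
--         if is_prime(n - d) or is_prime(n + d):
--             return d
--         d += 1
-- ===== SOURCE B (Python) =====
-- def is_prime(n):
--     if n < 2:
--         return False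
--     if n == 2:
--         return True
--     if n % 2 == 0:
--         return False
--     i = 3
--     while i * i <= n:
--         if n % i == 0:
--             return False
--         i += 2
--     return True
--
-- def nearest_prime_distance(n):
--     if is_prime(n):
--         return 0
--     d_below = None
--     m = n - 1
--     while m >= 2:
--         if is_prime(m):
--             d_below = n - m
--             break
--         m -= 1
--     d_above = 1
--     while not is_prime(n + d_above):
--         d_above += 1
--     return d_above if d_below is None else min(d_below, d_above)
-- ===== Notes on version B (the rewrite author's own statement) =====
-- stated objective: alternative
-- what changed: A's single interleaved loop that tests n-d and n+d together at each growing d is replaced by two independent direction-separated scans (nearest prime below via a downward scan that stops at 2, nearest prime above via an upward scan) combined with min.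
import Mathlib
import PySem

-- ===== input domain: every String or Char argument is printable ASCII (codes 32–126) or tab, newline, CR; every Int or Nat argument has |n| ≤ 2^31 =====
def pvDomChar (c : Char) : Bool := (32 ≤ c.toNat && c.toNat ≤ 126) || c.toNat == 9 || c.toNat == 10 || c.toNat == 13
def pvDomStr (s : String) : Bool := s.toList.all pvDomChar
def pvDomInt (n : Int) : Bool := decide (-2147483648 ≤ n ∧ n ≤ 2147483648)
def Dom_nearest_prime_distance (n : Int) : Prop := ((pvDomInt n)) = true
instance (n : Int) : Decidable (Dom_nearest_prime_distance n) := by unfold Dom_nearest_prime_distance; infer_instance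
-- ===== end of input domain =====

-- B replaces A's single interleaved expanding search by two direction-separated scans
-- (nearest prime below, nearest prime above) combined with min; objective: alternative.

-- ===== PORT A =====
-- trial-division inner while-loop of is_prime (i = 3, 5, 7, … while i*i ≤ n)
def is_prime_loop (n i : Int) : Bool :=
  if _h : i * i ≤ n then
    if n % i == 0 then false else is_prime_loop n (i + 2)
  else true
termination_by (n + 1 - i).toNat
decreasing_by
  have hi : i ≤ n := by
    by_cases h1 : 1 ≤ i
    · nlinarith
    · nlinarith
  omega

def is_prime (n : Int) : Bool :=
  if n < 2 then false
  else if n == 2 then true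
  else if n % 2 == 0 then false
  else is_prime_loop n 3

-- A's main while-loop, fuel only as a totality guard (never exhausted on the fuel A is given)
def npd_loop (n d : Int) : Nat → Int
  | 0 => 0
  | fuel + 1 =>
    if is_prime (n - d) || is_prime (n + d) then d else npd_loop n (d + 1) fuel

def nearest_prime_distance (n : Int) : Int :=
  if is_prime n then 0 else npd_loop n 1 (2 * n.natAbs + 5)

-- ===== PORT B =====
-- downward scan: first prime m ≤ start (while m ≥ 2), returns the distance n - m
def down_scan (n m : Int) : Option Int :=
  if _h : 2 ≤ m then
    if is_prime m then some (n - m) else down_scan n (m - 1)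
  else none
termination_by m.toNat
decreasing_by omega

-- upward scan: first d with n + d prime; fuel only as a totality guard
def up_scan (n d : Int) : Nat → Int
  | 0 => 0
  | fuel + 1 => if is_prime (n + d) then d else up_scan n (d + 1) fuel

def nearest_prime_distance_alt (n : Int) : Int :=
  if is_prime n then 0
  else
    let d_below := down_scan n (n - 1)
    let d_above := up_scan n 1 (2 * n.natAbs + 5)
    match d_below with
    | none => d_above
    | some db => min db d_above

-- ===== PRECONDITION & SPEC =====
def Spec_nearest_prime_distance (n : Int) (out : Int) : Prop := out = nearest_prime_distance_alt n
instance (n : Int) (out : Int) : Decidable (Spec_nearest_prime_distance n out) := by unfold Spec_nearest_prime_distance; infer_instance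

-- ===== CLAIM (what is proved, stated in full; the proofs are below) =====
def Claim_equal_nearest_prime_distance : Prop := ∀ (n : Int), Dom_nearest_prime_distance n → Spec_nearest_prime_distance n (nearest_prime_distance n)

-- ===== LEMMAS AND PROOFS =====

-- is_prime is false below 2
theorem is_prime_lt_two {m : Int} (h : m < 2) : is_prime m = false := by
  simp [is_prime, h]

-- the trial-division loop returns true when nothing in its range divides n
theorem is_prime_loop_true (n : Int) : ∀ i : Int,
    (∀ j : Int, i ≤ j → j * j ≤ n → ¬(j ∣ n)) → is_prime_loop n i = true := by
  intro i
  induction i using is_prime_loop.induct n with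
  | case1 i hle hdvd =>
    intro h
    exact absurd (Int.dvd_of_emod_eq_zero (by simpa using hdvd)) (h i le_rfl hle)
  | case2 i hle hdvd ih =>
    intro h
    rw [is_prime_loop, dif_pos hle, if_neg (by simpa using hdvd)]
    exact ih fun j hj hjj => h j (by omega) hjj
  | case3 i hle =>
    intro _
    rw [is_prime_loop, dif_neg hle]

-- a (mathematical) prime passes A's trial-division test
theorem is_prime_of_prime (p : ℕ) (hp : p.Prime) : is_prime (p : Int) = true := by
  rcases eq_or_ne p 2 with rfl | h2
  · simp [is_prime]
  · have hp2 := hp.two_le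
    have hodd : ¬ (2:ℕ) ∣ p := by
      intro h
      rcases hp.eq_one_or_self_of_dvd 2 h with h1 | h1 <;> omega
    have hm : p % 2 = 1 := by omega
    have hloop : is_prime_loop (p : Int) 3 = true := by
      apply is_prime_loop_true
      intro j hj hjj hdvd
      have hjn : ((j.toNat : ℕ) : Int) = j := Int.toNat_of_nonneg (by omega)
      have hdvdN : j.toNat ∣ p := by
        have h' : ((j.toNat : ℕ) : Int) ∣ (p : Int) := by rw [hjn]; exact hdvd
        exact_mod_cast h'
      rcases hp.eq_one_or_self_of_dvd _ hdvdN with h1 | h1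
      · omega
      · have hjp : j = (p : Int) := by omega
        nlinarith
    have hlt : (2:Int) ≤ (p:Int) := by exact_mod_cast hp2
    have hne : (p:Int) ≠ 2 := by exact_mod_cast h2
    have hmod : (p:Int) % 2 ≠ 0 := by omega
    rw [is_prime, if_neg (by omega), if_neg (by simpa using hne),
       if_neg (by simpa using hmod), hloop]

-- up_scan returns the first d ≥ start with n + d prime, given enough fuel
theorem up_scan_eq (n : Int) (r : Int) (hr : is_prime (n + r) = true) :
    ∀ (fuel : Nat) (d : Int), d ≤ r → (r - d).toNat < fuel →
    (∀ x : Int, d ≤ x → x < r → is_prime (n + x) = false) →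
    up_scan n d fuel = r := by
  intro fuel
  induction fuel with
  | zero => intro d _ h; omega
  | succ f ih =>
    intro d hd hfuel hmin
    rcases eq_or_lt_of_le hd with rfl | hlt
    · simp [up_scan, hr]
    · have hdf : is_prime (n + d) = false := hmin d le_rfl hlt
      rw [up_scan, hdf]
      simp only [Bool.false_eq_true, if_false]
      exact ih (d + 1) (by omega) (by omega) (fun x hx hxr => hmin x (by omega) hxr)

-- A's main loop returns the first d ≥ start satisfying its disjunction, given enough fuel
theorem npd_loop_eq (n : Int) (r : Int)
    (hr : (is_prime (n - r) || is_prime (n + r)) = true) :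
    ∀ (fuel : Nat) (d : Int), d ≤ r → (r - d).toNat < fuel →
    (∀ x : Int, d ≤ x → x < r → (is_prime (n - x) || is_prime (n + x)) = false) →
    npd_loop n d fuel = r := by
  intro fuel
  induction fuel with
  | zero => intro d _ h; omega
  | succ f ih =>
    intro d hd hfuel hmin
    rcases eq_or_lt_of_le hd with rfl | hlt
    · simp only [npd_loop, hr, if_true]
    · have hdf := hmin d le_rfl hlt
      rw [npd_loop, hdf]
      simp only [Bool.false_eq_true, if_false]
      exact ih (d + 1) (by omega) (by omega) (fun x hx hxr => hmin x (by omega) hxr)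

-- down_scan finds nothing when there is no prime in [2, m]
theorem down_scan_none (n : Int) : ∀ m : Int,
    (∀ m' : Int, 2 ≤ m' → m' ≤ m → is_prime m' = false) → down_scan n m = none := by
  intro m
  induction m using down_scan.induct with
  | case1 m h2 hp => intro h; exact absurd (h m h2 le_rfl) (by simp [hp])

  | case2 m h2 hp ih =>
    intro h
    rw [down_scan, dif_pos h2, if_neg (by simp [hp])]
    exact ih fun m' h2' hm' => h m' h2' (by omega)
  | case3 m h2 => intro _; rw [down_scan, dif_neg h2]

-- down_scan returns n - k for the greatest prime k ≤ m
theorem down_scan_some (n : Int) : ∀ m k : Int, 2 ≤ k → k ≤ m → is_prime k = true →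
    (∀ m' : Int, k < m' → m' ≤ m → is_prime m' = false) →
    down_scan n m = some (n - k) := by
  intro m
  induction m using down_scan.induct with
  | case1 m h2 hp =>
    intro k hk2 hkm hk hmax
    have : k = m := by
      by_contra hne
      exact absurd (hmax m (by omega) le_rfl) (by simp [hp])
    subst this
    rw [down_scan, dif_pos h2, if_pos hp]
  | case2 m h2 hp ih =>
    intro k hk2 hkm hk hmax
    have hne : k ≠ m := fun h => by subst h; simp [hk] at hp
    rw [down_scan, dif_pos h2, if_neg (by simp [hp])]
    exact ih k hk2 (by omega) hk (fun m' h1 h2' => hmax m' h1 (by omega))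
  | case3 m h2 => intro k hk2 hkm _ _; omega

-- ===== VERDICT (by name: the statement is the Claim_ definition above) =====
-- main equivalence proof
theorem nearest_prime_distance_spec : Claim_equal_nearest_prime_distance := by
  intro n _
  unfold Spec_nearest_prime_distance nearest_prime_distance nearest_prime_distance_alt
  by_cases hn : is_prime n = true
  · rw [if_pos hn, if_pos hn]
  have hnf : is_prime n = false := by simpa using hn
  rw [if_neg hn, if_neg hn]
  show npd_loop n 1 (2 * n.natAbs + 5) =
    match down_scan n (n - 1) with
    | none => up_scan n 1 (2 * n.natAbs + 5)
    | some db => min db (up_scan n 1 (2 * n.natAbs + 5))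
  -- a prime exists within distance |n| + 2 above n
  have hwit : ∃ w : Int, 1 ≤ w ∧ w ≤ (n.natAbs : Int) + 2 ∧ is_prime (n + w) = true := by
    by_cases h1 : n ≤ 1
    · exact ⟨2 - n, by omega, by omega, by rw [show n + (2 - n) = 2 by ring]; decide⟩
    · have hn0 : n.toNat ≠ 0 := by omega
      obtain ⟨p, pp, hplt, hple⟩ := Nat.exists_prime_lt_and_le_two_mul n.toNat hn0
      refine ⟨(p : Int) - n, by omega, by omega, ?_⟩
      rw [show n + ((p : Int) - n) = (p : Int) by ring]
      exact is_prime_of_prime p pp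
  obtain ⟨w, hw1, hwb, hwp⟩ := hwit
  -- the least distance upward, via Nat.find
  have hexk : ∃ k : ℕ, is_prime (n + 1 + (k : Int)) = true :=
    ⟨(w - 1).toNat, by rw [show n + 1 + (((w - 1).toNat : ℕ) : Int) = n + w by omega]; exact hwp⟩
  set kf := Nat.find hexk with hkfdef
  have hup : is_prime (n + (1 + (kf : Int))) = true := by
    have h := Nat.find_spec hexk
    rwa [show n + 1 + (kf : Int) = n + (1 + (kf : Int)) by ring] at h
  have hupmin : ∀ x : Int, 1 ≤ x → x < 1 + (kf : Int) → is_prime (n + x) = false := by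
    intro x hx1 hxk
    have hlt : (x - 1).toNat < kf := by omega
    have h := Nat.find_min hexk hlt
    rw [show n + 1 + (((x - 1).toNat : ℕ) : Int) = n + x by omega] at h
    simpa using h
  have hkfb : (kf : Int) ≤ (n.natAbs : Int) + 1 := by
    have h : kf ≤ (w - 1).toNat := Nat.find_min' hexk
      (by rw [show n + 1 + (((w - 1).toNat : ℕ) : Int) = n + w by omega]; exact hwp)
    omega
  have hupscan : up_scan n 1 (2 * n.natAbs + 5) = 1 + (kf : Int) :=
    up_scan_eq n (1 + (kf : Int)) hup (2 * n.natAbs + 5) 1 (by omega) (by omega) hupmin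
  by_cases h3 : n < 3
  · -- n ≤ 2: no primes below, both sides return the upward distance
    have hn2 : n ≠ 2 := by
      intro h; rw [h] at hnf; exact absurd hnf (by decide)
    have hn1 : n ≤ 1 := by omega
    have hdown : down_scan n (n - 1) = none :=
      down_scan_none n (n - 1) (fun m' h2 hm' => absurd h2 (by omega))
    have hA : npd_loop n 1 (2 * n.natAbs + 5) = 1 + (kf : Int) := by
      apply npd_loop_eq n (1 + (kf : Int)) (by simp [hup]) (2 * n.natAbs + 5) 1
        (by omega) (by omega)
      intro x hx1 hxr
      rw [is_prime_lt_two (by omega), hupmin x hx1 hxr]; rfl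
    rw [hdown, hA, hupscan]
  · -- n ≥ 3: a prime exists below (namely 2); the least distance downward, via Nat.find
    have hexd : ∃ k : ℕ, is_prime (n - 1 - (k : Int)) = true :=
      ⟨(n - 3).toNat, by rw [show n - 1 - (((n - 3).toNat : ℕ) : Int) = 2 by omega]; decide⟩
    set kd := Nat.find hexd with hkddef
    have hdp : is_prime (n - (1 + (kd : Int))) = true := by
      have h := Nat.find_spec hexd
      rwa [show n - 1 - (kd : Int) = n - (1 + (kd : Int)) by ring] at h
    have hdmin : ∀ x : Int, 1 ≤ x → x < 1 + (kd : Int) → is_prime (n - x) = false := by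
      intro x hx1 hxk
      have hlt : (x - 1).toNat < kd := by omega
      have h := Nat.find_min hexd hlt
      rw [show n - 1 - (((x - 1).toNat : ℕ) : Int) = n - x by omega] at h
      simpa using h
    have hkdb : (kd : Int) ≤ n - 3 := by
      have h : kd ≤ (n - 3).toNat := Nat.find_min' hexd
        (by rw [show n - 1 - (((n - 3).toNat : ℕ) : Int) = 2 by omega]; decide)
      omega
    have hdownscan : down_scan n (n - 1) = some (1 + (kd : Int)) := by
      have h := down_scan_some n (n - 1) (n - (1 + (kd : Int))) (by omega) (by omega) hdp
        (fun m' h1 h2 => by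
          have h' := hdmin (n - m') (by omega) (by omega)
          rwa [show n - (n - m') = m' by ring] at h')
      rwa [show n - (n - (1 + (kd : Int))) = 1 + (kd : Int) by ring] at h
    have hminle := min_le_right (1 + (kd : Int)) (1 + (kf : Int))
    have hA : npd_loop n 1 (2 * n.natAbs + 5) = min (1 + (kd : Int)) (1 + (kf : Int)) := by
      apply npd_loop_eq n (min (1 + (kd : Int)) (1 + (kf : Int)))
      · rcases min_choice (1 + (kd : Int)) (1 + (kf : Int)) with hm | hm <;>
          rw [hm] <;> simp [hdp, hup]
      · have := min_le_left (1 + (kd : Int)) (1 + (kf : Int))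
        omega
      · omega
      · intro x hx1 hxr
        rw [lt_min_iff] at hxr
        rw [hdmin x hx1 hxr.1, hupmin x hx1 hxr.2]; rfl
    rw [hdownscan, hA, hupscan]
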